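-- pv_equiv track=rewrite | github.com/keenanj-analytics/people-analytics-data-infrastructure | scripts/data_generation/05_align_subdept_level_grid.py | _consume_locked
-- ===== SOURCE A (Python) =====
-- def _consume_locked(
--     target_grid: dict[tuple[str, str, str], int],
--     locked: dict[str, tuple[str, str, str]],
-- ) -> dict[tuple[str, str, str], int]:
--     """Subtract locked profile counts from target grid; return remaining slots."""
--     remaining = dict(target_grid)
--     for _, (dept, sd, level) in locked.items():
--         key = (dept, sd, level)
--         remaining[key] = remaining.get(key, 0) - 1
--     return remaining
-- ===== SOURCE B (Python) =====
-- from collections import Counter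
--
--
-- def _consume_locked(
--     target_grid: dict[tuple[str, str, str], int],
--     locked: dict[str, tuple[str, str, str]],
-- ) -> dict[tuple[str, str, str], int]:
--     """Subtract locked profile counts from target grid; return remaining slots."""
--     vals = list(locked.values())
--     counts = Counter(vals)
--     remaining = {key: n - counts.get(key, 0) for key, n in target_grid.items()}
--     for key in vals:
--         if key not in remaining:
--             remaining[key] = -counts[key]
--     return remaining
-- ===== Notes on version B (the rewrite author's own statement) =====
-- stated objective: idiomatic
-- what changed: B rebuilds the result from the grid side: a dict comprehension subtracts each grid entry's tally (from a Counter of the locked values) in one shot, and a second pass appends only the locked keys missing from the grid, instead of A's decrement-per-locked-entry update loop over a copied dict.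
import Mathlib
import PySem

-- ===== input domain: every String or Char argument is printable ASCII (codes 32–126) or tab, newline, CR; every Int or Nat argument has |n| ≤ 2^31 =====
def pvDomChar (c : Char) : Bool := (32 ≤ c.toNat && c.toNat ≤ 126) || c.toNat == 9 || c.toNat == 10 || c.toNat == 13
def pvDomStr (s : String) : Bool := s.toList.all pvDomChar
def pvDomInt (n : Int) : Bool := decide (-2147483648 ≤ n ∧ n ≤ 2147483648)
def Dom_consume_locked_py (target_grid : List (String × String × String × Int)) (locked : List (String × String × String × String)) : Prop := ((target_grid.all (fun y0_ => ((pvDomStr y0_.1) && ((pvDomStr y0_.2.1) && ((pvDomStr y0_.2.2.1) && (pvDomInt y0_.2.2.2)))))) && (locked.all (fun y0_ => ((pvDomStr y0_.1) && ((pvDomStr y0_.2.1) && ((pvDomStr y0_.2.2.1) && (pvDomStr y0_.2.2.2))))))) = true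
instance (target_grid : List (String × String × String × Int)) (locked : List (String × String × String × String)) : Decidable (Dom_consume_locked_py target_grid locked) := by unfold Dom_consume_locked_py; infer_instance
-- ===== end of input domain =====

-- B rebuilds the result from the grid side (comprehension subtracting a Counter tally, then
-- appending the locked keys missing from the grid) instead of A's per-entry decrement loop.

-- ===== PORT A =====
def consume_locked_py (target_grid : List (String × String × String × Int)) (locked : List (String × String × String × String)) : List (String × String × String × Int) :=
  -- remaining = dict(target_grid)
  let remaining0 : PySem.Dict (String × String × String) Int :=
    PySem.Dict.ofList (target_grid.map (fun p => ((p.1, p.2.1, p.2.2.1), p.2.2.2)))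
  -- for _, (dept, sd, level) in locked.items(): remaining[key] = remaining.get(key, 0) - 1
  let remaining := locked.foldl
    (fun r p => r.insert (p.2.1, p.2.2.1, p.2.2.2) (r.getD (p.2.1, p.2.2.1, p.2.2.2) 0 - 1))
    remaining0
  remaining.items.map (fun q => (q.1.1, q.1.2.1, q.1.2.2, q.2))

-- ===== PORT B =====
def consume_locked_py_alt (target_grid : List (String × String × String × Int)) (locked : List (String × String × String × String)) : List (String × String × String × Int) :=
  -- vals = list(locked.values())
  let vals : List (String × String × String) := locked.map (fun p => (p.2.1, p.2.2.1, p.2.2.2))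
  -- counts = Counter(vals)
  let counts : PySem.Dict (String × String × String) Int := PySem.Dict.counter vals
  -- remaining = {key: n - counts.get(key, 0) for key, n in target_grid.items()}
  let base : List ((String × String × String) × Int) :=
    (PySem.Dict.ofList (target_grid.map (fun p => ((p.1, p.2.1, p.2.2.1), p.2.2.2)))).items.map
      (fun q => (q.1, q.2 - counts.getD q.1 0))
  -- for key in vals: if key not in remaining: remaining[key] = -counts[key]
  let remaining := vals.foldl
    (fun acc k => if (acc.map Prod.fst).contains k then acc else acc ++ [(k, -counts.getD k 0)])
    base
  remaining.map (fun q => (q.1.1, q.1.2.1, q.1.2.2, q.2))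

-- ===== PRECONDITION & SPEC =====
def Spec_consume_locked_py (target_grid : List (String × String × String × Int)) (locked : List (String × String × String × String)) (out : List (String × String × String × Int)) : Prop := out = consume_locked_py_alt target_grid locked
instance (target_grid : List (String × String × String × Int)) (locked : List (String × String × String × String)) (out : List (String × String × String × Int)) : Decidable (Spec_consume_locked_py target_grid locked out) := by unfold Spec_consume_locked_py; infer_instance

-- ===== CLAIM (what is proved, stated in full; the proofs are below) =====
def Claim_equal_consume_locked_py : Prop := ∀ (target_grid : List (String × String × String × Int)) (locked : List (String × String × String × String)), Dom_consume_locked_py target_grid locked → Spec_consume_locked_py target_grid locked (consume_locked_py target_grid locked)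

-- ===== LEMMAS AND PROOFS =====

-- the new keys that B's append loop adds, in order, starting from a key set S
def newKeys {κ : Type} [DecidableEq κ] (S : List κ) : List κ → List κ
  | [] => []
  | k :: ks => if k ∈ S then newKeys S ks else k :: newKeys (S ++ [k]) ks

theorem newKeys_not_mem {κ : Type} [DecidableEq κ]
    (vals : List κ) (S : List κ) : ∀ k ∈ newKeys S vals, k ∉ S := by
  induction vals generalizing S with
  | nil => simp [newKeys]
  | cons v vals ih =>
    intro k hk
    rw [newKeys] at hk
    split_ifs at hk with h
    · exact ih S k hk
    · rcases List.mem_cons.mp hk with rfl | hk'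
      · exact h
      · exact fun hmem => ih (S ++ [v]) k hk' (List.mem_append_left _ hmem)

theorem update_eq_append_newKeys {κ : Type} [BEq κ] [LawfulBEq κ] [DecidableEq κ]
    (vals : List κ) (S : PySem.Set κ) :
    PySem.Set.update S vals = S ++ newKeys S vals := by
  induction vals generalizing S with
  | nil => simp [newKeys, PySem.Set.update]
  | cons v vals ih =>
    rw [PySem.Set.update_cons, newKeys]
    by_cases h : v ∈ S
    · have : PySem.Set.add S v = S := by simp [PySem.Set.add, h]
      rw [this, ih, if_pos h]
    · have : PySem.Set.add S v = S ++ [v] := by simp [PySem.Set.add, h]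
      rw [this, ih, if_neg h, List.append_assoc]
      simp

-- B's append loop: appends exactly the (key, h key) pairs for the new keys
theorem foldl_append_missing {κ : Type} [BEq κ] [LawfulBEq κ] [DecidableEq κ]
    (vals : List κ) (acc : List (κ × Int)) (h : κ → Int) :
    vals.foldl (fun acc k => if (acc.map Prod.fst).contains k then acc else acc ++ [(k, h k)]) acc
      = acc ++ (newKeys (acc.map Prod.fst) vals).map (fun k => (k, h k)) := by
  induction vals generalizing acc with
  | nil => simp [newKeys]
  | cons v vals ih =>
    simp only [List.foldl_cons]
    rw [newKeys]
    by_cases hm : v ∈ acc.map Prod.fst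
    · rw [if_pos (by simpa using hm), if_pos hm, ih]
    · rw [if_neg (by simpa using hm), if_neg hm, ih]
      simp [List.append_assoc]

-- A's loop: final lookup at k is the initial lookup minus the number of occurrences of k.
theorem getD_foldl_dec {κ : Type} [BEq κ] [LawfulBEq κ] [DecidableEq κ]
    (xs : List κ) (r : PySem.Dict κ Int) (k : κ) :
    (xs.foldl (fun r x => r.insert x (r.getD x 0 - 1)) r).getD k 0
      = r.getD k 0 - xs.count k := by
  induction xs generalizing r with
  | nil => simp
  | cons x xs ih =>
    simp only [List.foldl_cons, ih, List.count_cons, PySem.Dict.getD_insert]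
    by_cases h : k = x
    · subst h; simp; omega
    · have : (x == k) = false := by simp; exact fun hx => h hx.symm
      simp [h, this]

-- ===== VERDICT (by name: the statement is the Claim_ definition above) =====
theorem consume_locked_py_spec : Claim_equal_consume_locked_py := by
  intro target_grid locked _
  unfold Spec_consume_locked_py
  simp only [consume_locked_py, consume_locked_py_alt]
  set g : PySem.Dict (String × String × String) Int :=
    PySem.Dict.ofList (target_grid.map (fun p => ((p.1, p.2.1, p.2.2.1), p.2.2.2))) with hg
  set vals : List (String × String × String) :=
    locked.map (fun p => (p.2.1, p.2.2.1, p.2.2.2)) with hvals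
  have hnd : g.keys.Nodup := PySem.Dict.nodup_keys_ofList _
  -- rewrite A's fold over `locked` as a fold over `vals`
  rw [← List.foldl_map (f := fun (p : String × String × String × String) => (p.2.1, p.2.2.1, p.2.2.2))
    (g := fun (r : PySem.Dict (String × String × String) Int) x => r.insert x (r.getD x 0 - 1))]
  set d := vals.foldl (fun r x => r.insert x (r.getD x 0 - 1)) g with hd
  have hkeys : d.keys = PySem.Set.update g.keys vals := PySem.Dict.keys_foldl_insert vals _ g
  have hndd : d.keys.Nodup := PySem.Dict.nodup_keys_foldl_insert vals _ g hnd
  -- A's items, as a map over its (Set.update) keys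
  rw [PySem.Dict.items_eq_map_keys d hndd 0, hkeys, update_eq_append_newKeys, List.map_append]
  -- B's base, as a map over g's keys
  rw [PySem.Dict.items_eq_map_keys g hnd 0, List.map_map, foldl_append_missing]
  have hbk : (List.map ((fun q : (String × String × String) × Int =>
        (q.1, q.2 - (PySem.Dict.counter vals).getD q.1 0)) ∘ fun k => (k, g.getD k 0))
        g.keys).map Prod.fst = g.keys := by
    simp [List.map_map, Function.comp_def]
  rw [hbk]
  simp only [List.map_append, List.map_map]
  congr 1
  · -- keys present in the grid
    apply List.map_congr_left
    intro k _
    simp only [Function.comp_def]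
    rw [hd, getD_foldl_dec, PySem.Dict.getD_counter]
  · -- keys appended for locked entries missing from the grid
    apply List.map_congr_left
    intro k hk
    have hknot : k ∉ g.keys := newKeys_not_mem vals g.keys k hk
    have hc : g.contains k = false := by
      by_contra h
      exact hknot ((PySem.Dict.contains_iff_mem_keys g k).mp (by simpa using h))
    simp only [Function.comp_def]
    rw [hd, getD_foldl_dec, PySem.Dict.getD_counter,
      PySem.Dict.getD_of_not_contains g 0 hc]
    simp
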